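-- pv_equiv track=rewrite | github.com/angishen/algorithms-datastructures | ch06_strings.py | spreadsheet_encoding
-- ===== SOURCE A (Python) =====
-- def spreadsheet_encoding(column_name):
--     int_val = 0
--     for i, letter in enumerate(column_name):
--         letter = letter.upper()
--         ascii_val = ord(letter) - 64
--         power = len(column_name) - 1 - i
--         val = 26 ** power * ascii_val
--         int_val += val
--     return int_val
-- ===== SOURCE B (Python) =====
-- def spreadsheet_encoding(column_name):
--     int_val = 0
--     for letter in column_name:
--         int_val = int_val * 26 + (ord(letter.upper()) - 64)
--     return int_val
-- ===== Notes on version B (the rewrite author's own statement) =====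
-- stated objective: faster
-- what changed: Replaced the per-character 26**power computation (a fresh exponentiation for every position) with a single left-to-right Horner fold int_val = int_val*26 + digit.
import Mathlib
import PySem

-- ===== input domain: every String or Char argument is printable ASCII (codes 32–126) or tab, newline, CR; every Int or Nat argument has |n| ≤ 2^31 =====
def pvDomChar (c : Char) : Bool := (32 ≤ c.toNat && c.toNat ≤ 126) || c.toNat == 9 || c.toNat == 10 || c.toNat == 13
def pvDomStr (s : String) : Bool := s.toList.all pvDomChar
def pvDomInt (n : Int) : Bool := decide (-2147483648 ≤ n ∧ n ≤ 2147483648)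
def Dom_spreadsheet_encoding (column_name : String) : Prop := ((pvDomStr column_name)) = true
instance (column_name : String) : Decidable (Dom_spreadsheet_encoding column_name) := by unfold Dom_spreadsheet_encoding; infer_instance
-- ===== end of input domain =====

-- B replaces A's per-position 26**power exponentiation with a single Horner fold (faster).

-- ===== PORT A =====
def spreadsheet_encoding (column_name : String) : Int :=
  let cs := column_name.toList
  (PySem.List.enumerate cs 0).foldl
    (fun int_val p =>
      let letter := PySem.Chars.upperChar p.2
      let ascii_val : Int := (letter.toNat : Int) - 64
      let power : Nat := cs.length - 1 - p.1.toNat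
      let val : Int := 26 ^ power * ascii_val
      int_val + val) 0

-- ===== PORT B =====
def spreadsheet_encoding_alt (column_name : String) : Int :=
  column_name.toList.foldl
    (fun int_val letter =>
      int_val * 26 + (((PySem.Chars.upperChar letter).toNat : Int) - 64)) 0

-- ===== PRECONDITION & SPEC =====
def Spec_spreadsheet_encoding (column_name : String) (out : Int) : Prop := out = spreadsheet_encoding_alt column_name
instance (column_name : String) (out : Int) : Decidable (Spec_spreadsheet_encoding column_name out) := by unfold Spec_spreadsheet_encoding; infer_instance

-- ===== CLAIM (what is proved, stated in full; the proofs are below) =====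
def Claim_equal_spreadsheet_encoding : Prop := ∀ (column_name : String), Dom_spreadsheet_encoding column_name → Spec_spreadsheet_encoding column_name (spreadsheet_encoding column_name)

-- ===== LEMMAS AND PROOFS =====

def pvF (c : Char) : Int := ((PySem.Chars.upperChar c).toNat : Int) - 64

def pvB (a : Int) (l : List Char) : Int :=
  l.foldl (fun int_val letter => int_val * 26 + pvF letter) a

lemma pvB_shift (l : List Char) : ∀ (a : Int),
    pvB a l = a * 26 ^ l.length + pvB 0 l := by
  induction l with
  | nil => intro a; simp [pvB]
  | cons c l ih =>
    intro a
    show pvB (a * 26 + pvF c) l = a * 26 ^ (l.length + 1) + pvB (0 * 26 + pvF c) l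
    rw [ih (a * 26 + pvF c), ih (0 * 26 + pvF c)]
    ring

lemma pvMain (n : ℕ) : ∀ (l : List Char) (k : ℕ) (a : Int), k + l.length = n →
    (PySem.List.enumerate l (k : Int)).foldl
      (fun int_val p => int_val + 26 ^ (n - 1 - p.1.toNat) * pvF p.2) a
    = a + pvB 0 l := by
  intro l
  induction l with
  | nil => intro k a _; simp [PySem.List.enumerate_nil, pvB]
  | cons c l ih =>
    intro k a hk
    have hk' : k + l.length + 1 = n := by simpa using hk
    rw [PySem.List.enumerate_cons]
    simp only [List.foldl_cons]
    have hpow : n - 1 - ((k : Int)).toNat = l.length := by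
      simp only [Int.toNat_natCast]
      omega
    have hcast : ((k : Int) + 1) = ((k + 1 : ℕ) : Int) := by push_cast; ring
    rw [hpow, hcast, ih (k + 1) _ (by omega)]
    have hB : pvB 0 (c :: l) = pvF c * 26 ^ l.length + pvB 0 l := by
      show pvB (0 * 26 + pvF c) l = pvF c * 26 ^ l.length + pvB 0 l
      rw [pvB_shift l (0 * 26 + pvF c)]
      ring
    rw [hB]
    ring

-- ===== VERDICT (by name: the statement is the Claim_ definition above) =====
theorem spreadsheet_encoding_spec : Claim_equal_spreadsheet_encoding := by
  intro s _
  show spreadsheet_encoding s = spreadsheet_encoding_alt s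
  unfold spreadsheet_encoding spreadsheet_encoding_alt
  simp only []
  have := pvMain s.toList.length s.toList 0 0 (by omega)
  simpa [pvF, pvB] using this
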